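-- pv_equiv track=rewrite | github.com/cirosantilli/project-euler-solvers | solvers/690.py | inv_series
-- ===== SOURCE A (Python) =====
-- MOD = 1_000_000_007
--
-- def inv_series(f: list[int], n: int) -> list[int]:
--     """
--     Series inverse g = 1/f mod x^(n+1), assuming f[0] != 0.
--     O(n^2) Newton-free recurrence.
--     """
--     mod = MOD
--     mod2 = mod * mod
--     g = [0] * (n + 1)
--     g0 = pow(f[0], mod - 2, mod)
--     g[0] = g0
--     for i in range(1, n + 1):
--         s = 0
--         for k in range(1, i + 1):
--             s += f[k] * g[i - k]
--             if s >= mod2: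
--                 s %= mod
--         g[i] = (-s * g0) % mod
--     return g
-- ===== SOURCE B (Python) =====
-- MOD = 1_000_000_007
--
--
-- def inv_series(f: list[int], n: int) -> list[int]:
--     """
--     Series inverse g = 1/f mod x^(n+1), assuming f[0] != 0.
--     Forward-elimination ("push") variant: once g[i] is known, its
--     contribution f[j-i]*g[i] is scattered into a running-sum array s,
--     so each coefficient is read off directly as -s[i]*g0.
--     """
--     mod = MOD
--     g0 = pow(f[0], mod - 2, mod)
--     g = [0] * (n + 1)
--     s = [0] * (n + 1)
--     for i in range(n + 1):
--         gi = (-s[i] * g0) % mod if i else g0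
--         g[i] = gi
--         for j in range(i + 1, n + 1):
--             s[j] = (s[j] + f[j - i] * gi) % mod
--     return g
-- ===== Notes on version B (the rewrite author's own statement) =====
-- stated objective: alternative
-- what changed: Replaced the gather recurrence (each g[i] computed by an inner backward convolution sum over all previous g) by a forward-elimination push: a running-sum array s receives each new coefficient's future contributions, so g[i] is read off directly as -s[i]*g0; also drops A's lazy mod2-threshold reduction for a plain mod at each update.
import Mathlib
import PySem

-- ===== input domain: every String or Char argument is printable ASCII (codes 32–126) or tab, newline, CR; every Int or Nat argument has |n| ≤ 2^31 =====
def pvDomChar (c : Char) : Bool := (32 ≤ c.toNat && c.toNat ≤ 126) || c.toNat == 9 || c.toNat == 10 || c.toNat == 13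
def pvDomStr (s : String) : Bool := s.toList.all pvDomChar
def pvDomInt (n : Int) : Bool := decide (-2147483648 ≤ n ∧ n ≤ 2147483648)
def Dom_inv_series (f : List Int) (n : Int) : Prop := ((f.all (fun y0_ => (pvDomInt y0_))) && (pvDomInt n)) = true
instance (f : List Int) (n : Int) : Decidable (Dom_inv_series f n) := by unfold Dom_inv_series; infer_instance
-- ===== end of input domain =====

-- B replaces A's gather recurrence (inner backward convolution sum per coefficient, with a
-- lazy mod2-threshold reduction) by a forward-elimination push into a running-sum array;
-- same O(n^2) cost, different traversal (objective: alternative).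

-- ===== PORT A =====
-- pow(b, e, m): square-and-multiply modular exponentiation, used by both ports; proved equal
-- to PySem.Int.powMod (Python's 3-arg pow for m > 0) in pvPowMod_eq below.
def pvPowMod (b : Int) (e : Nat) (m : Int) : Int :=
  if e = 0 then PySem.Int.mod 1 m
  else
    let r := pvPowMod (PySem.Int.mod (b * b) m) (e / 2) m
    if e % 2 = 1 then PySem.Int.mod (r * b) m else r
termination_by e
decreasing_by exact Nat.div_lt_self (Nat.pos_of_ne_zero (by assumption)) one_lt_two

def inv_series (f : List Int) (n : Int) : List Int :=
  let mod : Int := 1000000007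
  let mod2 : Int := mod * mod
  let g : List Int := List.replicate (n + 1).toNat 0
  let g0 : Int := pvPowMod (PySem.List.pyGetD f 0 0) 1000000005 mod
  let g := g.set 0 g0
  (PySem.List.pyRange 1 (n + 1) 1).foldl (fun g i =>
    let s := (PySem.List.pyRange 1 (i + 1) 1).foldl (fun s k =>
      let s := s + PySem.List.pyGetD f k 0 * PySem.List.pyGetD g (i - k) 0
      if mod2 ≤ s then PySem.Int.mod s mod else s) 0
    g.set i.toNat (PySem.Int.mod (-s * g0) mod)) g

-- ===== PORT B =====
def inv_series_alt (f : List Int) (n : Int) : List Int :=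
  let mod : Int := 1000000007
  let g0 : Int := pvPowMod (PySem.List.pyGetD f 0 0) 1000000005 mod
  let gs := (PySem.List.pyRange 0 (n + 1) 1).foldl (fun (gs : List Int × List Int) i =>
      let gi := if i ≠ 0 then PySem.Int.mod (-(PySem.List.pyGetD gs.2 i 0) * g0) mod else g0
      let g := gs.1.set i.toNat gi
      let s := (PySem.List.pyRange (i + 1) (n + 1) 1).foldl (fun s j =>
        s.set j.toNat (PySem.Int.mod (PySem.List.pyGetD s j 0 + PySem.List.pyGetD f (j - i) 0 * gi) mod)) gs.2
      (g, s))
    (List.replicate (n + 1).toNat 0, List.replicate (n + 1).toNat 0)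
  gs.1

-- ===== PRECONDITION & SPEC =====
-- Python A raises IndexError when n < 0 (g[0] on an empty buffer) or when f has fewer than
-- n+1 coefficients (f[k] out of range); Pre_ is exactly the inputs where A returns normally.
def Pre_inv_series (f : List Int) (n : Int) : Prop := 0 ≤ n ∧ n < (f.length : Int)
instance (f : List Int) (n : Int) : Decidable (Pre_inv_series f n) := by unfold Pre_inv_series; infer_instance
def pvWitness_inv_series : List Int × Int := ([3, 1, 4], 2)

def Spec_inv_series (f : List Int) (n : Int) (out : List Int) : Prop := out = inv_series_alt f n
instance (f : List Int) (n : Int) (out : List Int) : Decidable (Spec_inv_series f n out) := by unfold Spec_inv_series; infer_instance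

-- ===== CLAIM (what is proved, stated in full; the proofs are below) =====
def Claim_equal_inv_series : Prop := ∀ (f : List Int) (n : Int), Dom_inv_series f n → Pre_inv_series f n → Spec_inv_series f n (inv_series f n)

-- ===== LEMMAS AND PROOFS =====

def pvM : Int := 1000000007
def pvG0 (f : List Int) : Int := PySem.Int.powMod (PySem.List.pyGetD f 0 0) 1000000005 pvM

theorem pvPowMod_eq (e : Nat) (b m : Int) (hm : 0 < m) :
    pvPowMod b e m = PySem.Int.powMod b e m := by
  induction e using Nat.strong_induction_on generalizing b with
  | _ e ih =>
    unfold pvPowMod PySem.Int.powMod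
    by_cases h : e = 0
    · subst h; simp
    · rw [if_neg h, ih (e / 2) (Nat.div_lt_self (Nat.pos_of_ne_zero h) one_lt_two)]
      unfold PySem.Int.powMod
      simp only [PySem.Int.mod_eq_emod_of_pos hm]
      have hp : ((b * b) % m) ^ (e / 2) % m = (b * b) ^ (e / 2) % m :=
        Int.ModEq.pow (e / 2) (Int.emod_emod_of_dvd _ dvd_rfl)
      rw [hp]
      have hbb : (b * b) ^ (e / 2) = b ^ (2 * (e / 2)) := by
        rw [pow_mul, sq]
      rw [hbb]
      by_cases ho : e % 2 = 1
      · rw [if_pos ho]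
        rw [Int.mul_emod, Int.emod_emod_of_dvd _ dvd_rfl, ← Int.mul_emod, ← pow_succ]
        have : 2 * (e / 2) + 1 = e := by omega
        rw [this]
      · rw [if_neg ho]
        have : 2 * (e / 2) = e := by omega
        rw [this]

def pvDot (f g : List Int) (m : ℕ) : Int :=
  ((List.range m).map (fun t => f.getD (m - t) 0 * g.getD t 0)).sum

def pvGL (f : List Int) (g0 : Int) : ℕ → List Int
  | 0 => []
  | m + 1 => pvGL f g0 m ++
      [if m = 0 then g0 else PySem.Int.mod (-(pvDot f (pvGL f g0 m) m) * g0) pvM]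

def pvG (f : List Int) (g0 : Int) (m : ℕ) : Int :=
  if m = 0 then g0 else PySem.Int.mod (-(pvDot f (pvGL f g0 m) m) * g0) pvM

theorem pvGL_succ (f : List Int) (g0 : Int) (m : ℕ) :
    pvGL f g0 (m + 1) = pvGL f g0 m ++ [pvG f g0 m] := rfl

theorem pvGL_length (f : List Int) (g0 : Int) (m : ℕ) : (pvGL f g0 m).length = m := by
  induction m with
  | zero => rfl
  | succ m ih => simp [pvGL_succ, ih]

theorem pvGL_getD (f : List Int) (g0 : Int) {t m : ℕ} (h : t < m) :
    (pvGL f g0 m).getD t 0 = pvG f g0 t := by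
  induction m with
  | zero => omega
  | succ m ih =>
    rw [pvGL_succ]
    rcases Nat.lt_or_ge t m with h' | h'
    · rw [List.getD_append _ _ _ _ (by rw [pvGL_length]; exact h')]
      exact ih h'
    · have ht : t = m := by omega
      subst ht
      simp [List.getD, pvGL_length]

-- congruence through Python's % for the positive modulus pvM
theorem pvMod_modeq (a : Int) : PySem.Int.mod a pvM ≡ a [ZMOD pvM] := by
  rw [PySem.Int.mod_eq_emod_of_pos (by norm_num [pvM])]
  exact Int.emod_emod_of_dvd a dvd_rfl

theorem pvMod_congr {a b : Int} (h : a ≡ b [ZMOD pvM]) :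
    PySem.Int.mod a pvM = PySem.Int.mod b pvM := by
  rw [PySem.Int.mod_eq_emod_of_pos (b := pvM) (a := a) (by norm_num [pvM]),
      PySem.Int.mod_eq_emod_of_pos (b := pvM) (a := b) (by norm_num [pvM])]
  exact h

-- A's inner loop with the lazy threshold reduction is the plain sum, mod pvM
theorem pvCondFold (l : List Int) (a : Int) :
    l.foldl (fun s x =>
      if pvM * pvM ≤ s + x then PySem.Int.mod (s + x) pvM else s + x) a ≡ a + l.sum [ZMOD pvM] := by
  induction l generalizing a with
  | nil => simp
  | cons x l ih =>
    simp only [List.foldl_cons, List.sum_cons]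
    by_cases h : pvM * pvM ≤ a + x
    · simp only [if_pos h]
      calc _ ≡ PySem.Int.mod (a + x) pvM + l.sum [ZMOD pvM] := ih _
        _ ≡ (a + x) + l.sum [ZMOD pvM] := (pvMod_modeq (a + x)).add_right l.sum
        _ = a + (x + l.sum) := by ring
    · simp only [if_neg h]
      calc _ ≡ (a + x) + l.sum [ZMOD pvM] := ih _
        _ = a + (x + l.sum) := by ring

-- B's running sums reduce mod pvM at every update; still the plain sum, mod pvM
theorem pvModFold (l : List Int) (a : Int) :
    l.foldl (fun s x => PySem.Int.mod (s + x) pvM) a ≡ a + l.sum [ZMOD pvM] := by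
  induction l generalizing a with
  | nil => simp
  | cons x l ih =>
    simp only [List.foldl_cons, List.sum_cons]
    calc _ ≡ PySem.Int.mod (a + x) pvM + l.sum [ZMOD pvM] := ih _
      _ ≡ (a + x) + l.sum [ZMOD pvM] := (pvMod_modeq (a + x)).add_right l.sum
      _ = a + (x + l.sum) := by ring

theorem pvStep_eq {s d g0 : Int} (h : s ≡ d [ZMOD pvM]) :
    PySem.Int.mod (-s * g0) pvM = PySem.Int.mod (-d * g0) pvM :=
  pvMod_congr ((h.neg).mul_right g0)

def pvScat (f : List Int) (g0 : Int) (j m : ℕ) : Int :=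
  (List.range (min j m)).foldl
    (fun acc t => PySem.Int.mod (acc + f.getD (j - t) 0 * pvG f g0 t) pvM) 0


def pvStepA (f : List Int) (g0 : Int) (g : List Int) (i : Int) : List Int :=
  g.set i.toNat (PySem.Int.mod
    (-((PySem.List.pyRange 1 (i + 1) 1).foldl (fun s k =>
        if pvM * pvM ≤ s + PySem.List.pyGetD f k 0 * PySem.List.pyGetD g (i - k) 0 then
          PySem.Int.mod (s + PySem.List.pyGetD f k 0 * PySem.List.pyGetD g (i - k) 0) pvM
        else s + PySem.List.pyGetD f k 0 * PySem.List.pyGetD g (i - k) 0) 0) * g0) pvM)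

theorem pvSumRange (n : ℕ) (h : ℕ → Int) :
    ((List.range n).map h).sum = ∑ i ∈ Finset.range n, h i := rfl

theorem pvSetAt (a rest : List Int) (v : Int) :
    (a ++ (0 : Int) :: rest).set a.length v = a ++ v :: rest := by
  simp

theorem pvDot_eq (f : List Int) (g0 : Int) (m : ℕ) :
    pvDot f (pvGL f g0 m) m = ((List.range m).map (fun t => f.getD (m - t) 0 * pvG f g0 t)).sum := by
  unfold pvDot
  congr 1
  apply List.map_congr_left
  intro t ht
  rw [pvGL_getD f g0 (List.mem_range.mp ht)]

theorem pvInnerA (f : List Int) (g0 : Int) (m : ℕ) (g : List Int)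
    (hg : ∀ t < m + 1, g.getD t 0 = pvG f g0 t) :
    (PySem.List.pyRange 1 ((m + 1 : ℕ) + 1 : Int) 1).foldl (fun s k =>
        if pvM * pvM ≤ s + PySem.List.pyGetD f k 0 * PySem.List.pyGetD g (((m + 1 : ℕ) : Int) - k) 0 then
          PySem.Int.mod (s + PySem.List.pyGetD f k 0 * PySem.List.pyGetD g (((m + 1 : ℕ) : Int) - k) 0) pvM
        else s + PySem.List.pyGetD f k 0 * PySem.List.pyGetD g (((m + 1 : ℕ) : Int) - k) 0) 0
      ≡ pvDot f (pvGL f g0 (m + 1)) (m + 1) [ZMOD pvM] := by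
  have hb : (((m + 1 : ℕ) : Int) + 1 - 1).toNat = m + 1 := by
    push_cast; omega
  rw [PySem.List.pyRange_one, hb, List.foldl_map]
  rw [PySem.List.foldl_congr_mem _ _
      (fun s t => if pvM * pvM ≤ s + (f.getD (1 + t) 0 * pvG f g0 (m - t)) then
          PySem.Int.mod (s + (f.getD (1 + t) 0 * pvG f g0 (m - t))) pvM
        else s + (f.getD (1 + t) 0 * pvG f g0 (m - t))) 0 ?_]
  · have hc := pvCondFold ((List.range (m + 1)).map (fun t => f.getD (1 + t) 0 * pvG f g0 (m - t))) 0
    simp only [List.foldl_map] at hc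
    refine hc.trans ?_
    rw [zero_add, pvSumRange, pvDot_eq f g0 (m + 1), pvSumRange]
    rw [← Finset.sum_range_reflect (fun t => f.getD (m + 1 - t) 0 * pvG f g0 t) (m + 1)]
    have he : (∑ t ∈ Finset.range (m + 1), f.getD (1 + t) 0 * pvG f g0 (m - t))
        = ∑ t ∈ Finset.range (m + 1), f.getD (m + 1 - (m + 1 - 1 - t)) 0 * pvG f g0 (m + 1 - 1 - t) := by
      refine Finset.sum_congr rfl (fun t ht => ?_)
      have ht' : t ≤ m := by simpa [Nat.lt_succ_iff] using ht
      have h1 : m + 1 - 1 - t = m - t := by omega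
      have h2 : m + 1 - (m - t) = 1 + t := by omega
      rw [h1, h2]
    rw [he]
  · intro acc t ht
    have ht' : t ≤ m := by
      have := List.mem_range.mp ht; omega
    have e2 : ((m + 1 : ℕ) : Int) - (1 + (t : Int)) = ((m - t : ℕ) : Int) := by push_cast; omega
    have e1 : (1 : Int) + (t : Int) = ((1 + t : ℕ) : Int) := by push_cast; ring
    rw [e2, e1]
    simp only [PySem.List.pyGetD_natCast]
    rw [hg (m - t) (by omega)]

theorem pvStepA_eq (f : List Int) (g0 : Int) (m : ℕ) (pad : ℕ) :
    pvStepA f g0 (pvGL f g0 (m + 1) ++ List.replicate (pad + 1) 0) ((m + 1 : ℕ) : Int)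
      = pvGL f g0 (m + 2) ++ List.replicate pad 0 := by
  unfold pvStepA
  have hg : ∀ t < m + 1, (pvGL f g0 (m + 1) ++ List.replicate (pad + 1) (0 : Int)).getD t 0 = pvG f g0 t := by
    intro t ht
    rw [List.getD_append _ _ _ _ (by rw [pvGL_length]; exact ht), pvGL_getD f g0 ht]
  have hs := pvInnerA f g0 m _ hg
  rw [pvStep_eq hs]
  have hv : PySem.Int.mod (-(pvDot f (pvGL f g0 (m + 1)) (m + 1)) * g0) pvM = pvG f g0 (m + 1) := by
    simp [pvG]
  rw [hv]
  have hn : ((m + 1 : ℕ) : Int).toNat = (pvGL f g0 (m + 1)).length := by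
    rw [pvGL_length]; simp
  rw [hn, List.replicate_succ, pvSetAt, pvGL_succ f g0 (m + 1), pvGL_succ f g0 m]
  simp

theorem portA_loop (f : List Int) (g0 : Int) (N : ℕ) (hN : 1 ≤ N) :
    ∀ m, m ≤ N - 1 →
    (PySem.List.pyRange 1 (1 + (m : Int)) 1).foldl (pvStepA f g0)
        (pvGL f g0 1 ++ List.replicate (N - 1) 0)
      = pvGL f g0 (m + 1) ++ List.replicate (N - (m + 1)) 0 := by
  intro m
  induction m with
  | zero => intro _; rw [PySem.List.pyRange_one_eq_nil (by norm_num)]; rfl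
  | succ m ih =>
    intro hm
    have e : (1 : Int) + ((m + 1 : ℕ) : Int) = (1 + (m : Int)) + 1 := by push_cast; ring
    rw [e, PySem.List.pyRange_one_succ_right (by omega), List.foldl_append,
        ih (by omega)]
    have e2 : (1 : Int) + (m : Int) = ((m + 1 : ℕ) : Int) := by push_cast; ring
    rw [List.foldl_cons, List.foldl_nil, e2]
    have hpad : N - (m + 1) = (N - (m + 2)) + 1 := by omega
    rw [hpad, pvStepA_eq]

theorem portA (f : List Int) (n : Int) (hn : 0 ≤ n) :
    inv_series f n = pvGL f (pvG0 f) (n + 1).toNat := by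
  have hg : pvPowMod (PySem.List.pyGetD f 0 0) 1000000005 pvM = pvG0 f :=
    pvPowMod_eq 1000000005 _ _ (by norm_num [pvM])
  have hA : inv_series f n = (PySem.List.pyRange 1 (n + 1) 1).foldl
      (pvStepA f (pvPowMod (PySem.List.pyGetD f 0 0) 1000000005 pvM))
      ((List.replicate (n + 1).toNat 0).set 0
        (pvPowMod (PySem.List.pyGetD f 0 0) 1000000005 pvM)) := rfl
  rw [hg] at hA
  obtain ⟨N', hN'⟩ : ∃ N', (n + 1).toNat = N' + 1 := ⟨(n + 1).toNat - 1, by omega⟩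
  have hinit : (List.replicate (N' + 1) (0 : Int)).set 0 (pvG0 f)
      = pvGL f (pvG0 f) 1 ++ List.replicate ((N' + 1) - 1) 0 := by
    rw [List.replicate_succ]
    show pvG0 f :: List.replicate N' (0 : Int) = _
    simp [pvGL]
  have hrange : (n + 1 : Int) = 1 + (N' : Int) := by omega
  rw [hA, hN', hinit, hrange, portA_loop f (pvG0 f) (N' + 1) (by omega) N' (by omega)]
  simp

def pvGi (g0 : Int) (s : List Int) (i : Int) : Int :=
  if i ≠ 0 then PySem.Int.mod (-(PySem.List.pyGetD s i 0) * g0) pvM else g0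

def pvStepB (f : List Int) (g0 b : Int) (gs : List Int × List Int) (i : Int) : List Int × List Int :=
  (gs.1.set i.toNat (pvGi g0 gs.2 i),
   (PySem.List.pyRange (i + 1) b 1).foldl (fun s j =>
      s.set j.toNat (PySem.Int.mod
        (PySem.List.pyGetD s j 0 + PySem.List.pyGetD f (j - i) 0 * pvGi g0 gs.2 i) pvM)) gs.2)

theorem pvGetD_set (l : List Int) (k j : ℕ) (v : Int) (hj : j < l.length) :
    (l.set k v).getD j 0 = if j = k then v else l.getD j 0 := by
  simp only [List.getD_eq_getElem?_getD, List.getElem?_set]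
  by_cases h : k = j
  · subst h; rw [if_pos rfl, if_pos rfl, if_pos (by omega)]; rfl
  · rw [if_neg h, if_neg (fun hh => h hh.symm)]

theorem pvScat_le (f : List Int) (g0 : Int) {j m : ℕ} (h : j ≤ m) :
    pvScat f g0 j (m + 1) = pvScat f g0 j m := by
  unfold pvScat
  rw [Nat.min_eq_left (by omega), Nat.min_eq_left (by omega)]

theorem pvScat_succ (f : List Int) (g0 : Int) {j m : ℕ} (h : m < j) :
    pvScat f g0 j (m + 1)
      = PySem.Int.mod (pvScat f g0 j m + f.getD (j - m) 0 * pvG f g0 m) pvM := by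
  unfold pvScat
  rw [Nat.min_eq_right (by omega), Nat.min_eq_right (by omega), List.range_succ,
      List.foldl_append, List.foldl_cons, List.foldl_nil]

theorem pvScat_self (f : List Int) (g0 : Int) (m : ℕ) :
    pvScat f g0 m m ≡ pvDot f (pvGL f g0 m) m [ZMOD pvM] := by
  unfold pvScat
  rw [Nat.min_self]
  have hc := pvModFold ((List.range m).map (fun t => f.getD (m - t) 0 * pvG f g0 t)) 0
  simp only [List.foldl_map] at hc
  refine hc.trans ?_
  rw [zero_add, ← pvDot_eq f g0 m]

theorem pvPushAux (f : List Int) (g0 : Int) (N m : ℕ) (s : List Int)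
    (hlen : s.length = N) (hs : ∀ j < N, s.getD j 0 = pvScat f g0 j m) :
    ∀ u, m + 1 + u ≤ N →
    ((PySem.List.pyRange ((m : Int) + 1) ((m + 1 + u : ℕ) : Int) 1).foldl (fun s j =>
        s.set j.toNat (PySem.Int.mod
          (PySem.List.pyGetD s j 0 + PySem.List.pyGetD f (j - (m : Int)) 0 * pvG f g0 m) pvM)) s).length = N
    ∧ ∀ j < N, ((PySem.List.pyRange ((m : Int) + 1) ((m + 1 + u : ℕ) : Int) 1).foldl (fun s j =>
        s.set j.toNat (PySem.Int.mod
          (PySem.List.pyGetD s j 0 + PySem.List.pyGetD f (j - (m : Int)) 0 * pvG f g0 m) pvM)) s).getD j 0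
      = if j < m + 1 + u then pvScat f g0 j (m + 1) else pvScat f g0 j m := by
  intro u
  induction u with
  | zero =>
    intro _
    rw [PySem.List.pyRange_one_eq_nil (by push_cast; omega)]
    refine ⟨hlen, fun j hj => ?_⟩
    simp only [List.foldl_nil]
    rw [hs j hj]
    split_ifs with h
    · rw [pvScat_le f g0 (by omega)]
    · rfl
  | succ u ih =>
    intro hu
    obtain ⟨ih1, ih2⟩ := ih (by omega)
    have e : ((m + 1 + (u + 1) : ℕ) : Int) = ((m + 1 + u : ℕ) : Int) + 1 := by push_cast; ring
    rw [e, PySem.List.pyRange_one_succ_right (by push_cast; omega), List.foldl_append,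
        List.foldl_cons, List.foldl_nil]
    set s1 := (PySem.List.pyRange ((m : Int) + 1) ((m + 1 + u : ℕ) : Int) 1).foldl _ s with hs1
    have hidx : ((m + 1 + u : ℕ) : Int).toNat = m + 1 + u := by omega
    have hread : PySem.List.pyGetD s1 ((m + 1 + u : ℕ) : Int) 0 = pvScat f g0 (m + 1 + u) m := by
      rw [PySem.List.pyGetD_natCast, ih2 (m + 1 + u) (by omega)]
      simp
    have hfidx : ((m + 1 + u : ℕ) : Int) - (m : Int) = ((u + 1 : ℕ) : Int) := by push_cast; omega
    rw [hidx, hread, hfidx, PySem.List.pyGetD_natCast]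
    constructor
    · rw [List.length_set]; exact ih1
    · intro j hj
      rw [pvGetD_set _ _ _ _ (by rw [ih1]; exact hj)]
      by_cases h1 : j = m + 1 + u
      · subst h1
        rw [if_pos rfl, if_pos (by omega), pvScat_succ f g0 (by omega)]
        have hd : m + 1 + u - m = u + 1 := by omega
        rw [hd]
      · rw [if_neg h1, ih2 j hj]
        by_cases h2 : j < m + 1 + u
        · rw [if_pos h2, if_pos (by omega)]
        · rw [if_neg h2, if_neg (by omega)]

theorem pvOuterB (f : List Int) (g0 : Int) (N : ℕ) :
    ∀ m, m ≤ N →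
    ((PySem.List.pyRange 0 ((m : ℕ) : Int) 1).foldl (pvStepB f g0 ((N : ℕ) : Int))
        (List.replicate N 0, List.replicate N 0)).1 = pvGL f g0 m ++ List.replicate (N - m) 0
    ∧ ((PySem.List.pyRange 0 ((m : ℕ) : Int) 1).foldl (pvStepB f g0 ((N : ℕ) : Int))
        (List.replicate N 0, List.replicate N 0)).2.length = N
    ∧ ∀ j < N, ((PySem.List.pyRange 0 ((m : ℕ) : Int) 1).foldl (pvStepB f g0 ((N : ℕ) : Int))
        (List.replicate N 0, List.replicate N 0)).2.getD j 0 = pvScat f g0 j m := by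
  intro m
  induction m with
  | zero =>
    intro _
    rw [PySem.List.pyRange_one_eq_nil (by norm_num)]
    refine ⟨by simp [pvGL], by simp, fun j hj => ?_⟩
    simp only [List.foldl_nil]
    rw [List.getD_eq_getElem?_getD]
    simp [pvScat]
  | succ m ih =>
    intro hm
    obtain ⟨ih1, ih2, ih3⟩ := ih (by omega)
    have e : ((m + 1 : ℕ) : Int) = ((m : ℕ) : Int) + 1 := by push_cast; ring
    rw [e, PySem.List.pyRange_one_succ_right (by positivity), List.foldl_append,
        List.foldl_cons, List.foldl_nil]
    set st := (PySem.List.pyRange 0 ((m : ℕ) : Int) 1).foldl (pvStepB f g0 ((N : ℕ) : Int))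
        (List.replicate N 0, List.replicate N 0) with hst
    have hgi : pvGi g0 st.2 ((m : ℕ) : Int) = pvG f g0 m := by
      unfold pvGi
      rcases Nat.eq_zero_or_pos m with hm0 | hm0
      · subst hm0; simp [pvG]
      · rw [if_pos (show ((m : ℕ) : Int) ≠ 0 by omega)]
        rw [PySem.List.pyGetD_natCast, ih3 m (by omega)]
        rw [pvStep_eq (pvScat_self f g0 m)]
        unfold pvG
        rw [if_neg (by omega)]
    have hg' : (st.1.set ((m : ℕ) : Int).toNat (pvGi g0 st.2 ((m : ℕ) : Int)))
        = pvGL f g0 (m + 1) ++ List.replicate (N - (m + 1)) 0 := by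
      rw [hgi, ih1]
      have hpad : N - m = (N - (m + 1)) + 1 := by omega
      rw [hpad, List.replicate_succ]
      have hidx : ((m : ℕ) : Int).toNat = (pvGL f g0 m).length := by
        rw [pvGL_length]; simp
      rw [hidx, pvSetAt, pvGL_succ]
      simp
    have hpush := pvPushAux f g0 N m st.2 ih2 ih3 (N - (m + 1)) (by omega)
    have hcnt : m + 1 + (N - (m + 1)) = N := by omega
    rw [hcnt] at hpush
    refine ⟨?_, ?_, ?_⟩
    · show (pvStepB f g0 ((N : ℕ) : Int) st ((m : ℕ) : Int)).1 = _
      unfold pvStepB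
      exact hg'
    · show (pvStepB f g0 ((N : ℕ) : Int) st ((m : ℕ) : Int)).2.length = N
      unfold pvStepB
      simp only [hgi]
      exact hpush.1
    · intro j hj
      show (pvStepB f g0 ((N : ℕ) : Int) st ((m : ℕ) : Int)).2.getD j 0 = _
      unfold pvStepB
      simp only [hgi]
      rw [hpush.2 j hj, if_pos hj]

theorem portB (f : List Int) (n : Int) (hn : 0 ≤ n) :
    inv_series_alt f n = pvGL f (pvG0 f) (n + 1).toNat := by
  have hg : pvPowMod (PySem.List.pyGetD f 0 0) 1000000005 pvM = pvG0 f :=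
    pvPowMod_eq 1000000005 _ _ (by norm_num [pvM])
  have hB : inv_series_alt f n = ((PySem.List.pyRange 0 (n + 1) 1).foldl
      (pvStepB f (pvPowMod (PySem.List.pyGetD f 0 0) 1000000005 pvM) (n + 1))
      (List.replicate (n + 1).toNat 0, List.replicate (n + 1).toNat 0)).1 := rfl
  rw [hg] at hB
  have hcast : (n + 1 : Int) = (((n + 1).toNat : ℕ) : Int) := by omega
  have hout := (pvOuterB f (pvG0 f) (n + 1).toNat (n + 1).toNat le_rfl).1
  rw [← hcast] at hout
  rw [hB, hout]
  simp

-- ===== VERDICT (by name: the statement is the Claim_ definition above) =====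
theorem inv_series_spec : Claim_equal_inv_series := by
  intro f n _ hpre
  unfold Spec_inv_series
  rw [portA f n hpre.1, portB f n hpre.1]
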